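-- pv_equiv track=rewrite | github.com/wjlim/AESPA | bin/sqs_generate.py | process_sequence_chunk
-- ===== SOURCE A (Python) =====
-- from collections import Counter
--
-- def process_sequence_chunk(sequences):
--     base_counter, num_reads, q20_counter, q30_counter = Counter(), 0, 0, 0
--     for i, sequence in enumerate(sequences):
--         if i % 2 == 0:
--             base_counter.update(sequence)
--             num_reads += 1
--         else:
--             q30_counter += sum(ord(char) - 33 >= 30 for char in sequence)
--             q20_counter += sum(ord(char) - 33 >= 20 for char in sequence)
--     return base_counter, num_reads, q20_counter, q30_counter
-- ===== SOURCE B (Python) =====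
-- from collections import Counter
--
-- def process_sequence_chunk(sequences):
--     # Partition into read lines and quality lines, join each partition once,
--     # and derive all four results from whole-string Counters.
--     lst = list(sequences)
--     reads = lst[0::2]
--     quals = lst[1::2]
--     base_counter = Counter("".join(reads))
--     qc = Counter("".join(quals))
--     q20_counter = sum(n for ch, n in qc.items() if ord(ch) >= 53)
--     q30_counter = sum(n for ch, n in qc.items() if ord(ch) >= 63)
--     return base_counter, len(reads), q20_counter, q30_counter
-- ===== Notes on version B (the rewrite author's own statement) =====
-- stated objective: faster
-- what changed: Replaces the enumerate/i%2-dispatched interleaved loop by materializing the two parity partitions via slicing, joining each into one string, and reading all four results off whole-string Counters (quality thresholds aggregated over the quality Counter's distinct characters instead of per-character generator sums).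
import Mathlib
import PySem

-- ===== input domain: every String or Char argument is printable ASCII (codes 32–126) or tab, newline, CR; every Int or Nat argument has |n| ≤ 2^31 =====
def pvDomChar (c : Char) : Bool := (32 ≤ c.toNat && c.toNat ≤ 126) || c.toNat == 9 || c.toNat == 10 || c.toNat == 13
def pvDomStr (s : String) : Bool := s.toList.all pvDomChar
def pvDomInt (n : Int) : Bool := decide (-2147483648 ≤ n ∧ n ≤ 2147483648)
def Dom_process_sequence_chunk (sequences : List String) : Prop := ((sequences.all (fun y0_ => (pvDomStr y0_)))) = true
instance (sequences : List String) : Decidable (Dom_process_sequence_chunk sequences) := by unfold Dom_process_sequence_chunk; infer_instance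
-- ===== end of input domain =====

-- B replaces A's enumerate/i%2-dispatched interleaved loop by slicing out the two parity
-- partitions, joining each into one string, and reading base counts and quality counts off
-- whole-string Counters (thresholds aggregated over the quality Counter's distinct chars);
-- same asymptotic cost, measurably faster by constant factor (bulk join/Counter vs per-char loop).

-- ===== PORT A =====
-- Counter.update(s): for each char, count[char] += 1 (a Python char is a 1-char str key)
def pvCountUpdate (d : PySem.Dict String Int) (s : String) : PySem.Dict String Int :=
  s.toList.foldl (fun d c => d.modify (String.ofList [c]) 0 (· + 1)) d

-- sum(ord(char) - 33 >= t for char in sequence)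
def pvSum (t : Int) (cs : List Char) : Int :=
  cs.foldl (fun s c => s + (if t ≤ (c.toNat : Int) - 33 then 1 else 0)) 0

def process_sequence_chunk (sequences : List String) : (List (String × Int)) × Int × Int × Int :=
  let st := (PySem.List.enumerate sequences 0).foldl
    (fun (acc : PySem.Dict String Int × Int × Int × Int) p =>
      if PySem.Int.mod p.1 2 = 0 then
        (pvCountUpdate acc.1 p.2, acc.2.1 + 1, acc.2.2.1, acc.2.2.2)
      else
        (acc.1, acc.2.1, acc.2.2.1 + pvSum 20 p.2.toList, acc.2.2.2 + pvSum 30 p.2.toList))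
    (PySem.Dict.empty, 0, 0, 0)
  (st.1.items, st.2.1, st.2.2.1, st.2.2.2)

-- ===== PORT B =====
def process_sequence_chunk_alt (sequences : List String) : (List (String × Int)) × Int × Int × Int :=
  -- lst[0::2] / lst[1::2]; step 2 ≠ 0, so slice? never returns none and getD's default is dead
  let reads := (PySem.List.slice? sequences (some 0) none 2).getD []
  let quals := (PySem.List.slice? sequences (some 1) none 2).getD []
  -- Counter("".join(reads)): Python iterates a str as 1-char strings
  let base_counter := PySem.Dict.counter ((PySem.Str.join "" reads).toList.map (fun c => String.ofList [c]))
  let qc := PySem.Dict.counter (PySem.Str.join "" quals).toList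
  let q20 := ((qc.items.filter (fun p => 53 ≤ p.1.toNat)).map (fun p => p.2)).sum
  let q30 := ((qc.items.filter (fun p => 63 ≤ p.1.toNat)).map (fun p => p.2)).sum
  (base_counter.items, (reads.length : Int), q20, q30)

-- ===== PRECONDITION & SPEC =====
def Spec_process_sequence_chunk (sequences : List String) (out : (List (String × Int)) × Int × Int × Int) : Prop := out = process_sequence_chunk_alt sequences
instance (sequences : List String) (out : (List (String × Int)) × Int × Int × Int) : Decidable (Spec_process_sequence_chunk sequences out) := by unfold Spec_process_sequence_chunk; infer_instance

-- ===== CLAIM (what is proved, stated in full; the proofs are below) =====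
def Claim_equal_process_sequence_chunk : Prop := ∀ (sequences : List String), Dom_process_sequence_chunk sequences → Spec_process_sequence_chunk sequences (process_sequence_chunk sequences)

-- ===== LEMMAS AND PROOFS =====

-- the even- and odd-indexed elements of a list, structurally
def pvEvens {α : Type} : List α → List α
  | [] => []
  | [x] => [x]
  | x :: _ :: r => x :: pvEvens r

def pvOdds {α : Type} : List α → List α
  | [] => []
  | [_] => []
  | _ :: y :: r => y :: pvOdds r

theorem pvFMe {α : Type} : ∀ (xs : List α),
    List.filterMap (fun k => xs[2 * k]?) (List.range ((xs.length + 1) / 2)) = pvEvens xs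
  | [] => by simp [pvEvens]
  | [x] => by simp [pvEvens, List.range_succ]
  | x :: y :: r => by
      have hc : ((x :: y :: r).length + 1) / 2 = (r.length + 1) / 2 + 1 := by
        simp; omega
      rw [hc, List.range_succ_eq_map, List.filterMap_cons, List.filterMap_map]
      simp only [Nat.mul_zero, List.getElem?_cons_zero]
      have hfun : ((fun k => (x :: y :: r)[2 * k]?) ∘ Nat.succ) = fun k => r[2 * k]? := by
        funext k
        show (x :: y :: r)[2 * (k + 1)]? = r[2 * k]?
        have h2 : 2 * (k + 1) = 2 * k + 1 + 1 := by omega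
        rw [h2, List.getElem?_cons_succ, List.getElem?_cons_succ]
      rw [hfun, pvFMe r]
      rfl

theorem pvFMo {α : Type} : ∀ (xs : List α),
    List.filterMap (fun k => xs[2 * k + 1]?) (List.range (xs.length / 2)) = pvOdds xs
  | [] => by simp [pvOdds]
  | [x] => by simp [pvOdds]
  | x :: y :: r => by
      have hc : (x :: y :: r).length / 2 = r.length / 2 + 1 := by
        simp; omega
      rw [hc, List.range_succ_eq_map, List.filterMap_cons, List.filterMap_map]
      simp only [Nat.mul_zero, Nat.zero_add, List.getElem?_cons_succ, List.getElem?_cons_zero]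
      have hfun : ((fun k => (y :: r)[2 * k]?) ∘ Nat.succ) = fun k => r[2 * k + 1]? := by
        funext k
        show (y :: r)[2 * (k + 1)]? = r[2 * k + 1]?
        have h2 : 2 * (k + 1) = 2 * k + 1 + 1 := by omega
        rw [h2, List.getElem?_cons_succ]
      rw [hfun, pvFMo r]
      rfl

theorem pvReads_eq {α : Type} (xs : List α) :
    (PySem.List.slice? xs (some 0) none 2).getD [] = pvEvens xs := by
  rw [← pvFMe xs]
  simp only [PySem.List.slice?, PySem.List.sliceIndices]
  norm_num
  have hf : (fun x : Nat => xs[(2 * (x:Int)).toNat]?) = fun k => xs[2 * k]? := by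
    funext k; rw [show ((2 * (k:Int)).toNat) = 2 * k by omega]
  have hcnt : (if 0 < xs.length then (((xs.length:Int) + 2 - 1) / 2).toNat else 0) = (xs.length + 1) / 2 := by
    split_ifs <;> omega
  rw [hf, hcnt]

theorem pvQuals_eq {α : Type} (xs : List α) :
    (PySem.List.slice? xs (some 1) none 2).getD [] = pvOdds xs := by
  rw [← pvFMo xs]
  cases xs with
  | nil => simp [PySem.List.slice?, PySem.List.sliceIndices]
  | cons a t =>
    simp only [PySem.List.slice?, PySem.List.sliceIndices]
    norm_num
    have hf : (fun x : Nat => (a :: t)[((1:Int) + 2 * (x:Int)).toNat]?) = fun k => t[2 * k]? := by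
      funext k
      rw [show (((1:Int) + 2 * (k:Int)).toNat) = 2 * k + 1 by omega, List.getElem?_cons_succ]
    have hcnt : (if 0 < t.length then (((t.length:Int) + 2 - 1) / 2).toNat else 0) = (t.length + 1) / 2 := by
      split_ifs <;> omega
    rw [hf, hcnt]

-- A's interleaved loop, characterised by the parity partition
theorem pvMain : ∀ (xs : List String) (d : PySem.Dict String Int) (nr q20 q30 s : Int),
    PySem.Int.mod s 2 = 0 →
    (PySem.List.enumerate xs s).foldl
      (fun (acc : PySem.Dict String Int × Int × Int × Int) p =>
        if PySem.Int.mod p.1 2 = 0 then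
          (pvCountUpdate acc.1 p.2, acc.2.1 + 1, acc.2.2.1, acc.2.2.2)
        else
          (acc.1, acc.2.1, acc.2.2.1 + pvSum 20 p.2.toList, acc.2.2.2 + pvSum 30 p.2.toList))
      (d, nr, q20, q30)
    = ((pvEvens xs).foldl pvCountUpdate d,
       nr + ((pvEvens xs).length : Int),
       q20 + (((pvOdds xs).map (fun q => pvSum 20 q.toList)).sum),
       q30 + (((pvOdds xs).map (fun q => pvSum 30 q.toList)).sum))
  | [], d, nr, q20, q30, s, hs => by
      simp [PySem.List.enumerate_nil, pvEvens, pvOdds]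
  | [r], d, nr, q20, q30, s, hs => by
      simp [PySem.List.enumerate_cons, PySem.List.enumerate_nil, pvEvens, pvOdds]
      exact (PySem.Int.mod_eq_zero_iff_dvd s 2).mp hs
  | r :: q :: rest, d, nr, q20, q30, s, hs => by
      have h2 : (2 : Int) ∣ s := (PySem.Int.mod_eq_zero_iff_dvd s 2).mp hs
      have h1 : ¬ PySem.Int.mod (s + 1) 2 = 0 := by
        rw [PySem.Int.mod_eq_zero_iff_dvd]; omega
      have h2' : PySem.Int.mod (s + 2) 2 = 0 := by
        rw [PySem.Int.mod_eq_zero_iff_dvd]; omega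
      rw [PySem.List.enumerate_cons, PySem.List.enumerate_cons]
      simp only [List.foldl_cons, hs, if_pos, h1, if_neg, not_false_iff]
      rw [show s + 1 + 1 = s + 2 by ring, pvMain rest _ _ _ _ _ h2']
      simp [pvEvens, pvOdds]
      refine ⟨by omega, by ring, by ring⟩

-- the read-line Counter updates are the Counter of the concatenated read characters
theorem pvUpdates_eq_counter : ∀ (reads : List String) (d : PySem.Dict String Int),
    reads.foldl pvCountUpdate d
    = ((reads.map String.toList).flatten.map (fun c => String.ofList [c])).foldl
        (fun d x => d.modify x 0 (· + 1)) d
  | [], d => by simp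
  | r :: rest, d => by
      rw [List.foldl_cons, pvUpdates_eq_counter rest]
      simp [List.foldl_append, List.foldl_map, pvCountUpdate]

theorem pvJoinNilFlatten (ls : List (List Char)) : PySem.Chars.join [] ls = ls.flatten := by
  induction ls with
  | nil => rfl
  | cons a t ih => cases t with
    | nil => simp [PySem.Chars.join, List.intercalate]
    | cons b t2 => rw [PySem.Chars.join_cons_cons] at *; simp_all

-- pvSum is a count of characters over the threshold
theorem pvSum_eq_countP (t : Int) (cs : List Char) :
    pvSum t cs = (cs.countP (fun c => t ≤ (c.toNat : Int) - 33) : Int) := by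
  unfold pvSum
  rw [PySem.List.foldl_add]
  simpa using PySem.List.sum_map_ite_one_zero (fun c => decide (t ≤ (c.toNat : Int) - 33)) cs

-- summing counts of the distinct over-threshold characters = counting over-threshold characters
theorem pvItemsSum (tn : Nat) (cs : List Char) :
    ((((PySem.Dict.counter cs).items.filter (fun q => tn ≤ q.1.toNat)).map (fun q => q.2)).sum)
    = (cs.countP (fun c => tn ≤ c.toNat) : Int) := by
  rw [PySem.Dict.items_counter, List.filter_map, List.map_map]
  have hperm : ((PySem.Set.ofList cs).filter (fun c => tn ≤ c.toNat)).Perm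
      (cs.dedup.filter (fun c => tn ≤ c.toNat)) := by
    refine List.Perm.filter _ ?_
    refine (List.perm_ext_iff_of_nodup (PySem.Set.nodup_ofList cs) cs.nodup_dedup).mpr ?_
    intro x; rw [PySem.Set.mem_ofList, List.mem_dedup]
  calc ((List.filter ((fun q => decide (tn ≤ q.1.toNat)) ∘ fun k => (k, (cs.count k : Int)))
            (PySem.Set.ofList cs)).map
          ((fun q => q.2) ∘ fun k => (k, (cs.count k : Int)))).sum
      = (((cs.dedup.filter (fun c => tn ≤ c.toNat)).map (fun k => cs.count k)).sum : Int) := by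
        rw [show ((fun q => decide (tn ≤ q.1.toNat)) ∘ fun k : Char => (k, (cs.count k : Int)))
              = fun c : Char => decide (tn ≤ c.toNat) from rfl]
        rw [hperm.map _ |>.sum_eq]
        simp [Function.comp_def]
    _ = (cs.countP (fun c => tn ≤ c.toNat) : Int) := by
        rw [List.sum_map_count_dedup_filter_eq_countP _ cs]

-- the accumulated per-quality-line sums are one count over the joined quality characters
theorem pvQside (t : Int) (tn : Nat)
    (h : ∀ c : Char, decide (t ≤ (c.toNat : Int) - 33) = decide (tn ≤ c.toNat)) (quals : List String) :
    ((quals.map (fun q => pvSum t q.toList)).sum)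
    = (((quals.map String.toList).flatten.countP (fun c => tn ≤ c.toNat) : Nat) : Int) := by
  have hfun : (fun c => decide (t ≤ (c.toNat : Int) - 33)) = (fun c : Char => decide (tn ≤ c.toNat)) :=
    funext h
  rw [List.countP_flatten, List.map_map]
  induction quals with
  | nil => simp
  | cons q rest ih =>
    simp only [List.map_cons, List.sum_cons]
    rw [ih, pvSum_eq_countP, hfun]
    push_cast
    simp [Function.comp_def]

-- ===== VERDICT (by name: the statement is the Claim_ definition above) =====
theorem process_sequence_chunk_spec : Claim_equal_process_sequence_chunk := by
  intro sequences _
  unfold Spec_process_sequence_chunk process_sequence_chunk process_sequence_chunk_alt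
  dsimp only
  rw [pvMain sequences PySem.Dict.empty 0 0 0 0 (by decide)]
  rw [pvReads_eq, pvQuals_eq]
  have hflat : ∀ (l : List String),
      (PySem.Str.join "" l).toList = (l.map String.toList).flatten := by
    intro l
    rw [PySem.Str.toList_join]
    exact pvJoinNilFlatten _
  simp only [Prod.mk.injEq]
  refine ⟨?_, by simp, ?_, ?_⟩
  · rw [pvUpdates_eq_counter, ← PySem.Dict.counter_eq_foldl, hflat]
  · rw [hflat, pvItemsSum 53, ← pvQside 20 53 (by intro c; simp; omega)]
    simp
  · rw [hflat, pvItemsSum 63, ← pvQside 30 63 (by intro c; simp; omega)]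
    simp
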